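-- pv_equiv track=rewrite | github.com/jc7k/state-sped-policy-eval | src/visualization/utils.py | format_outcome_label
-- ===== SOURCE A (Python) =====
-- def format_outcome_label(outcome: str) -> str:
--     """
--     Convert outcome variable name to readable label.
--
--     Args:
--         outcome: Variable name like 'math_grade4_gap'
--
--     Returns:
--         Formatted label like 'Mathematics Grade 4 Achievement Gap'
--     """
--     if not isinstance(outcome, str):
--         return str(outcome)
--
--     parts = outcome.lower().split("_")
--
--     # Subject mapping
--     subject_map = {
--         "math": "Mathematics",
--         "reading": "Reading",
--         "science": "Science",
--         "writing": "Writing",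
--     }
--     subject = next((subject_map[s] for s in parts if s in subject_map), "Achievement")
--
--     # Grade mapping
--     grade_map = {"grade4": "Grade 4", "grade8": "Grade 8", "grade12": "Grade 12"}
--     grade = next((grade_map[g] for g in parts if g in grade_map), "")
--
--     # Metric mapping
--     metric_map = {
--         "gap": "Achievement Gap",
--         "score": "Score",
--         "proficient": "Proficiency Rate",
--         "advanced": "Advanced Rate",
--     }
--     metric = next((metric_map[m] for m in parts if m in metric_map), "Outcome")
--
--     return f"{subject} {grade} {metric}".strip()
-- ===== SOURCE B (Python) =====
-- def format_outcome_label(outcome: str) -> str: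
--     """Convert outcome variable name to readable label (single-pass version)."""
--     if not isinstance(outcome, str):
--         return str(outcome)
--
--     subject_map = {
--         "math": "Mathematics",
--         "reading": "Reading",
--         "science": "Science",
--         "writing": "Writing",
--     }
--     grade_map = {"grade4": "Grade 4", "grade8": "Grade 8", "grade12": "Grade 12"}
--     metric_map = {
--         "gap": "Achievement Gap",
--         "score": "Score",
--         "proficient": "Proficiency Rate",
--         "advanced": "Advanced Rate",
--     }
--
--     subject = grade = metric = None
--     for p in outcome.lower().split("_"):
--         if subject is None and p in subject_map:
--             subject = subject_map[p]
--         if grade is None and p in grade_map: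
--             grade = grade_map[p]
--         if metric is None and p in metric_map:
--             metric = metric_map[p]
--
--     if subject is None:
--         subject = "Achievement"
--     if grade is None:
--         grade = ""
--     if metric is None:
--         metric = "Outcome"
--
--     return f"{subject} {grade} {metric}".strip()
-- ===== Notes on version B (the rewrite author's own statement) =====
-- stated objective: alternative
-- what changed: Replaces the three independent early-exit scans over the token list (one next() per category) by a single loop that traverses the tokens once, maintaining three Option accumulators set on first match per category.
import Mathlib
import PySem

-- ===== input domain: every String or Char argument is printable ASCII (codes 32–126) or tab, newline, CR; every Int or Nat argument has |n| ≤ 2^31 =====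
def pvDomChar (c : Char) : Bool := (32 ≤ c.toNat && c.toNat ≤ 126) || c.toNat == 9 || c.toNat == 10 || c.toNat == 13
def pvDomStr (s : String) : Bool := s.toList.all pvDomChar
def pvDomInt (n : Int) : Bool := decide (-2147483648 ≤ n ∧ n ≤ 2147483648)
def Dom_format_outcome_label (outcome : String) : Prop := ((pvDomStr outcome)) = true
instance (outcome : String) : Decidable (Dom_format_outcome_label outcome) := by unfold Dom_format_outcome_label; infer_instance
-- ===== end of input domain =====

-- B replaces A's three early-exit scans over the tokens by one pass with three Option accumulators; same results, alternative decomposition.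
-- The 'not isinstance(outcome, str)' guard of both Pythons is vacuous here (the argument is a String by type).

-- ===== PORT A =====

def pvSubjectMap : PySem.Dict String String :=
  PySem.Dict.ofList [("math", "Mathematics"), ("reading", "Reading"), ("science", "Science"), ("writing", "Writing")]

def pvGradeMap : PySem.Dict String String :=
  PySem.Dict.ofList [("grade4", "Grade 4"), ("grade8", "Grade 8"), ("grade12", "Grade 12")]

def pvMetricMap : PySem.Dict String String :=
  PySem.Dict.ofList [("gap", "Achievement Gap"), ("score", "Score"), ("proficient", "Proficiency Rate"), ("advanced", "Advanced Rate")]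

-- next((map[x] for x in parts if x in map), dflt): first token that is a key, else the default
def pvNextMap (m : PySem.Dict String String) : List String → String → String
  | [], dflt => dflt
  | p :: ps, dflt =>
    match PySem.Dict.get? m p with
    | some v => v
    | none => pvNextMap m ps dflt

def format_outcome_label (outcome : String) : String :=
  let parts := (PySem.Str.split? (PySem.Str.lower outcome) "_").getD []
  let subject := pvNextMap pvSubjectMap parts "Achievement"
  let grade := pvNextMap pvGradeMap parts ""
  let metric := pvNextMap pvMetricMap parts "Outcome"
  PySem.Str.strip (subject ++ " " ++ grade ++ " " ++ metric)

-- ===== PORT B =====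

-- one loop body: set each accumulator only if still unset and the token is a key of its map
def pvStep (st : Option String × Option String × Option String) (p : String) :
    Option String × Option String × Option String :=
  let s := if st.1.isNone then (pvSubjectMap.get? p).or st.1 else st.1
  let g := if st.2.1.isNone then (pvGradeMap.get? p).or st.2.1 else st.2.1
  let m := if st.2.2.isNone then (pvMetricMap.get? p).or st.2.2 else st.2.2
  (s, g, m)

def format_outcome_label_alt (outcome : String) : String :=
  let st := ((PySem.Str.split? (PySem.Str.lower outcome) "_").getD []).foldl pvStep (none, none, none)
  PySem.Str.strip (st.1.getD "Achievement" ++ " " ++ st.2.1.getD "" ++ " " ++ st.2.2.getD "Outcome")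

-- ===== PRECONDITION & SPEC =====
def Spec_format_outcome_label (outcome : String) (out : String) : Prop := out = format_outcome_label_alt outcome
instance (outcome : String) (out : String) : Decidable (Spec_format_outcome_label outcome out) := by unfold Spec_format_outcome_label; infer_instance

-- ===== CLAIM (what is proved, stated in full; the proofs are below) =====
def Claim_equal_format_outcome_label : Prop := ∀ (outcome : String), Dom_format_outcome_label outcome → Spec_format_outcome_label outcome (format_outcome_label outcome)

-- ===== LEMMAS AND PROOFS =====

-- first key hit of a map over the token list, as an Option
def pvFirstHit (m : PySem.Dict String String) : List String → Option String
  | [] => none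
  | p :: ps => (m.get? p).or (pvFirstHit m ps)

lemma pvNextMap_eq_firstHit (m : PySem.Dict String String) (ps : List String) (d : String) :
    pvNextMap m ps d = (pvFirstHit m ps).getD d := by
  induction ps with
  | nil => rfl
  | cons p ps ih =>
    simp only [pvNextMap, pvFirstHit]
    cases m.get? p <;> simp [ih]

lemma pvFold_eq_firstHit (ps : List String) (s g m : Option String) :
    ps.foldl pvStep (s, g, m) =
      (s.or (pvFirstHit pvSubjectMap ps), g.or (pvFirstHit pvGradeMap ps),
        m.or (pvFirstHit pvMetricMap ps)) := by
  induction ps generalizing s g m with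
  | nil => simp [pvFirstHit]
  | cons p ps ih =>
    simp only [List.foldl_cons, pvStep, pvFirstHit, ih]
    cases s <;> cases g <;> cases m <;>
      simp [Option.or_none, Option.some_or]

-- ===== VERDICT (by name: the statement is the Claim_ definition above) =====
theorem format_outcome_label_spec : Claim_equal_format_outcome_label := by
  intro outcome _
  unfold Spec_format_outcome_label format_outcome_label format_outcome_label_alt
  simp only [pvFold_eq_firstHit, pvNextMap_eq_firstHit, Option.none_or]
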